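-- pv_equiv track=rewrite | github.com/chaofanwang123/My-Leetcode-Solutions-Python- | Leetcode 6/Teemo Attacking.py | findPoisonedDuration2
-- ===== SOURCE A (Python) =====
-- def findPoisonedDuration2(timeSeries, duration):
--     """
--     :type timeSeries: List[int]
--     :type duration: int
--     :rtype: int
--     """
--     st = ed = 0
--     ans = 0
--     for t in timeSeries:
--         if t >= ed:
--             ans += ed - st
--             st = t
--             ed = st + duration
--         else:
--             ed = t + duration
--     ans += ed - st
--     return ans
-- ===== SOURCE B (Python) =====
-- def findPoisonedDuration2(timeSeries, duration):
--     if not timeSeries: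
--         return 0
--     return duration + sum(min(b - a, duration)
--                           for a, b in zip(timeSeries, timeSeries[1:]))
-- ===== Notes on version B (the rewrite author's own statement) =====
-- stated objective: idiomatic
-- what changed: Replaces A's maintained merged-interval state (st/ed with a reset branch and a post-loop add) by directly summing each consecutive gap clamped to duration, plus one final duration.
-- outside the precondition, e.g. on findPoisonedDuration2([-2], 3): A returns 1, B returns 3
import Mathlib
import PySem

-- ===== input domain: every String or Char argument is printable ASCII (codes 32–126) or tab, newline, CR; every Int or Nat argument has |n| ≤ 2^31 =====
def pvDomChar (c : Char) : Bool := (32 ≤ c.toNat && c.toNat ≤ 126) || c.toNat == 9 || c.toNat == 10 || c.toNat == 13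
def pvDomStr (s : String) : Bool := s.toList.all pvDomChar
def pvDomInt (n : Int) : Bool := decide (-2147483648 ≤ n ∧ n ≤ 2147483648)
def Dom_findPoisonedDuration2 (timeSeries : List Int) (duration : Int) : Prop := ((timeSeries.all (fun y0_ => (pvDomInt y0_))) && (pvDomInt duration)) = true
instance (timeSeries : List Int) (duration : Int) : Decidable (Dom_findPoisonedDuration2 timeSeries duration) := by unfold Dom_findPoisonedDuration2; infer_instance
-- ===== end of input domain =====

-- B replaces A's maintained merged-interval state (st/ed with a reset branch and a
-- post-loop add) by the idiomatic one-liner: duration plus the sum of consecutive gaps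
-- clamped to duration; equivalence is proved on the problem's natural domain (first
-- attack time nonnegative, see Pre_ below).

-- ===== PORT A =====
-- loop body of A: state (st, ed, ans)
def pvStepA (duration : Int) (acc : Int × Int × Int) (t : Int) : Int × Int × Int :=
  if t ≥ acc.2.1 then (t, t + duration, acc.2.2 + acc.2.1 - acc.1)
  else (acc.1, t + duration, acc.2.2)

def findPoisonedDuration2 (timeSeries : List Int) (duration : Int) : Int :=
  let s := timeSeries.foldl (pvStepA duration) (0, 0, 0)
  s.2.2 + s.2.1 - s.1

-- ===== PORT B =====
def findPoisonedDuration2_alt (timeSeries : List Int) (duration : Int) : Int :=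
  match timeSeries with
  | [] => 0
  | _ :: rest =>
      duration + ((timeSeries.zip rest).map (fun p => min (p.2 - p.1) duration)).sum

-- ===== PRECONDITION & SPEC =====
-- Pre_ excludes nonempty lists whose first attack time is negative: timestamps in this
-- problem are nonnegative, and on such inputs A's st=ed=0 initialization makes it measure
-- the first poison segment from time 0 — an artefact of its implementation that B's
-- natural gap-sum does not reproduce.
def Pre_findPoisonedDuration2 (timeSeries : List Int) (duration : Int) : Prop :=
  timeSeries = [] ∨ 0 ≤ timeSeries.headI
instance (timeSeries : List Int) (duration : Int) : Decidable (Pre_findPoisonedDuration2 timeSeries duration) := by unfold Pre_findPoisonedDuration2; infer_instance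

def pvWitness_findPoisonedDuration2 : List Int × Int := ([1, 2, 8], 4)

def Spec_findPoisonedDuration2 (timeSeries : List Int) (duration : Int) (out : Int) : Prop := out = findPoisonedDuration2_alt timeSeries duration
instance (timeSeries : List Int) (duration : Int) (out : Int) : Decidable (Spec_findPoisonedDuration2 timeSeries duration out) := by unfold Spec_findPoisonedDuration2; infer_instance

-- ===== CLAIM (what is proved, stated in full; the proofs are below) =====
def Claim_equal_findPoisonedDuration2 : Prop := ∀ (timeSeries : List Int) (duration : Int), Dom_findPoisonedDuration2 timeSeries duration → Pre_findPoisonedDuration2 timeSeries duration → Spec_findPoisonedDuration2 timeSeries duration (findPoisonedDuration2 timeSeries duration)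

-- ===== LEMMAS AND PROOFS =====

/-- Running A's loop over `rest` from a state whose `ed` component is `prev + duration`
    telescopes to the clamped-gap sum that B computes. -/
theorem pvLoopA (duration : Int) :
    ∀ (rest : List Int) (st prev ans : Int),
      (let s := rest.foldl (pvStepA duration) (st, prev + duration, ans)
       s.2.2 + s.2.1 - s.1)
      = ans + prev + duration - st
        + (((prev :: rest).zip rest).map (fun p => min (p.2 - p.1) duration)).sum := by
  intro rest
  induction rest with
  | nil => intro st prev ans; simp; ring
  | cons t rs ih =>
      intro st prev ans
      by_cases h : t ≥ prev + duration
      · have hmin : min (t - prev) duration = duration := by omega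
        simp only [List.foldl_cons, pvStepA, if_pos h, List.zip_cons_cons, List.map_cons,
          List.sum_cons, hmin]
        rw [ih]
        ring
      · have hmin : min (t - prev) duration = t - prev := by omega
        simp only [List.foldl_cons, pvStepA, if_neg h, List.zip_cons_cons, List.map_cons,
          List.sum_cons, hmin]
        rw [ih]
        ring

-- ===== VERDICT (by name: the statement is the Claim_ definition above) =====
theorem findPoisonedDuration2_spec : Claim_equal_findPoisonedDuration2 := by
  intro ts d _ hPre
  cases ts with
  | nil => rfl
  | cons t0 rest =>
      have h0 : 0 ≤ t0 := by
        rcases hPre with h | h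
        · exact absurd h (by simp)
        · simpa [List.headI] using h
      show findPoisonedDuration2 (t0 :: rest) d = findPoisonedDuration2_alt (t0 :: rest) d
      unfold findPoisonedDuration2 findPoisonedDuration2_alt
      simp only [List.foldl_cons, pvStepA, if_pos (show t0 ≥ (0:Int) from h0)]
      have := pvLoopA d rest t0 t0 ((0:Int) + 0 - 0)
      simp only at this ⊢
      rw [this]
      ring
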